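-- pv_equiv track=rewrite | github.com/PIQuIL/QuCumber | qucumber/utils/ed/data_generator.py | CreateBasisSet
-- ===== SOURCE A (Python) =====
-- def CreateBasisSet(name_code,N):
--
--     basis_set = []
--     tmp = []
--     for j in range(N):
--         tmp.append('Z')
--     basis_set.append(tmp)
--     if (name_code == 'x'):
--         for j in range(N):
--             tmp = []
--             for j2 in range(N):
--                 if (j==j2):
--                     tmp.append('X')
--                 else:
--                     tmp.append('Z')
--             basis_set.append(tmp)
--     if (name_code == 'xy1' or name_code == 'xy2nn'):
--         for b in ['X','Y']:
--             for j in range(N):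
--                 tmp = []
--                 for j2 in range(N):
--                     if (j==j2):
--                         tmp.append(b)
--                     else:
--                         tmp.append('Z')
--                 basis_set.append(tmp)
--
--     if (name_code == 'xy2nn'):
--         for b1 in ['X','Y']:
--             for b2 in ['X','Y']:
--                 for i in range(N-1):
--                     tmp = []
--                     for j in range(N-1):
--                         if (i==j):
--                             tmp.append(b1)
--                             tmp.append(b2)
--                         else:
--                             tmp.append('Z')
--                     basis_set.append(tmp)
--     return basis_set
-- ===== SOURCE B (Python) =====
-- def _windows(block, N):
--     """All placements of `block` over a Z background of length N, left to right:
--     Z^i + block + Z^(N-k-i) for i = 0 .. N-k, built by segment concatenation."""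
--     k = len(block)
--     return [['Z'] * i + block + ['Z'] * (N - k - i) for i in range(N - k + 1)]
--
--
-- def CreateBasisSet(name_code, N):
--     basis_set = [['Z'] * N]
--     if name_code == 'x':
--         basis_set += _windows(['X'], N)
--     if name_code in ('xy1', 'xy2nn'):
--         basis_set += _windows(['X'], N) + _windows(['Y'], N)
--     if name_code == 'xy2nn':
--         for pair in (['X', 'X'], ['X', 'Y'], ['Y', 'X'], ['Y', 'Y']):
--             basis_set += _windows(pair, N)
--     return basis_set
-- ===== Notes on version B (the rewrite author's own statement) =====
-- stated objective: simpler
-- what changed: All four row families are produced by one generic 'slide a block across a Z background' helper that builds each row as a closed-form concatenation Z^i + block + Z^(N-k-i), replacing A's three hand-written nested loops with per-cell position-equality tests.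
import Mathlib
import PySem

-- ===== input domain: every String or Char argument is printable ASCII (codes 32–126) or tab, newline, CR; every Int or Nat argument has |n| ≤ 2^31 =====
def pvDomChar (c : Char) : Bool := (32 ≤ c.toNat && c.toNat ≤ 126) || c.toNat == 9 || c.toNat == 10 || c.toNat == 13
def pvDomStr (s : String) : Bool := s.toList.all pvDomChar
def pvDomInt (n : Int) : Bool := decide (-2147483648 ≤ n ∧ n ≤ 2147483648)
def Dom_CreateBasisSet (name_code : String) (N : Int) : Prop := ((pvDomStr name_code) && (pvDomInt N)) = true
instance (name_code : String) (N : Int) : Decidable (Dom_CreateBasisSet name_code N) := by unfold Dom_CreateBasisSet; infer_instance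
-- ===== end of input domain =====

-- B replaces A's three hand-written nested loops (per-cell position-equality tests) by one
-- generic 'slide a block across a Z background' helper building each row as the closed-form
-- concatenation Z^i ++ block ++ Z^(N-k-i); objective: simpler.

-- ===== PORT A =====
def CreateBasisSet (name_code : String) (N : Int) : List (List String) :=
  let basis_set : List (List String) := []
  let tmp := (PySem.List.pyRange 0 N 1).foldl (fun acc _ => acc ++ ["Z"]) []
  let basis_set := basis_set ++ [tmp]
  let basis_set :=
    if name_code == "x" then
      (PySem.List.pyRange 0 N 1).foldl (fun bs j =>
        bs ++ [(PySem.List.pyRange 0 N 1).foldl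
                 (fun t j2 => t ++ [if j == j2 then "X" else "Z"]) []]) basis_set
    else basis_set
  let basis_set :=
    if name_code == "xy1" || name_code == "xy2nn" then
      (["X", "Y"]).foldl (fun bs b =>
        (PySem.List.pyRange 0 N 1).foldl (fun bs j =>
          bs ++ [(PySem.List.pyRange 0 N 1).foldl
                   (fun t j2 => t ++ [if j == j2 then b else "Z"]) []]) bs) basis_set
    else basis_set
  let basis_set :=
    if name_code == "xy2nn" then
      (["X", "Y"]).foldl (fun bs b1 =>
        (["X", "Y"]).foldl (fun bs b2 =>
          (PySem.List.pyRange 0 (N - 1) 1).foldl (fun bs i =>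
            bs ++ [(PySem.List.pyRange 0 (N - 1) 1).foldl
                     (fun t j => if i == j then t ++ [b1] ++ [b2] else t ++ ["Z"]) []]) bs) bs)
        basis_set
    else basis_set
  basis_set

-- ===== PORT B =====
-- _windows: all placements of `block` over a Z background of length N, by segment concatenation
def windowsRows (block : List String) (N : Int) : List (List String) :=
  let k : Int := block.length
  (PySem.List.pyRange 0 (N - k + 1) 1).map
    (fun i => List.replicate i.toNat "Z" ++ block ++ List.replicate (N - k - i).toNat "Z")

def CreateBasisSet_alt (name_code : String) (N : Int) : List (List String) :=
  let basis_set : List (List String) := [List.replicate N.toNat "Z"]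
  let basis_set :=
    if name_code == "x" then basis_set ++ windowsRows ["X"] N else basis_set
  let basis_set :=
    if name_code == "xy1" || name_code == "xy2nn" then
      basis_set ++ (windowsRows ["X"] N ++ windowsRows ["Y"] N)
    else basis_set
  let basis_set :=
    if name_code == "xy2nn" then
      ([["X", "X"], ["X", "Y"], ["Y", "X"], ["Y", "Y"]]).foldl
        (fun bs p => bs ++ windowsRows p N) basis_set
    else basis_set
  basis_set

-- ===== PRECONDITION & SPEC =====
def Spec_CreateBasisSet (name_code : String) (N : Int) (out : List (List String)) : Prop := out = CreateBasisSet_alt name_code N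
instance (name_code : String) (N : Int) (out : List (List String)) : Decidable (Spec_CreateBasisSet name_code N out) := by unfold Spec_CreateBasisSet; infer_instance

-- ===== CLAIM (what is proved, stated in full; the proofs are below) =====
def Claim_equal_CreateBasisSet : Prop := ∀ (name_code : String) (N : Int), Dom_CreateBasisSet name_code N → Spec_CreateBasisSet name_code N (CreateBasisSet name_code N)

-- ===== LEMMAS AND PROOFS =====

-- A's all-Z inner loop builds the uniform base row
lemma zrow_eq (N : Int) :
    (PySem.List.pyRange 0 N 1).foldl (fun acc _ => acc ++ ["Z"]) [] =
      List.replicate N.toNat "Z" := by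
  rw [PySem.List.foldl_append_singleton_eq_map (fun _ : Int => "Z")]
  simp [List.map_const', PySem.List.length_pyRange_one]

lemma flatMap_const_Z (l : List Int) :
    (l.flatMap (fun _ => ["Z"])) = List.replicate l.length "Z" := by
  induction l with
  | nil => rfl
  | cons x xs ih => simp [List.flatMap_cons, ih, List.replicate_succ]

-- generic: A's conditional-append inner loop over range(m) with block inserted at i
-- equals the segment concatenation Z^i ++ block ++ Z^(m-1-i)
lemma row_concat_eq (m i : Int) (block : List String) (h0 : 0 ≤ i) (h1 : i < m) :
    (PySem.List.pyRange 0 m 1).foldl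
        (fun t j => t ++ (if i == j then block else ["Z"])) [] =
      List.replicate i.toNat "Z" ++ block ++ List.replicate (m - 1 - i).toNat "Z" := by
  rw [PySem.List.foldl_append_eq_flatMap, List.nil_append]
  have hsplit : PySem.List.pyRange 0 m 1 =
      (PySem.List.pyRange 0 i 1 ++ [i]) ++ PySem.List.pyRange (i + 1) m 1 := by
    rw [PySem.List.pyRange_one_append 0 i m h0 (by omega),
        PySem.List.pyRange_one_cons (by omega : i < m)]
    simp
  rw [hsplit, List.flatMap_append, List.flatMap_append]
  have hpre : (PySem.List.pyRange 0 i 1).flatMap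
      (fun j => if i == j then block else ["Z"]) = List.replicate i.toNat "Z" := by
    have hc : ∀ j ∈ PySem.List.pyRange 0 i 1,
        (if i == j then block else ["Z"]) = (fun _ : Int => ["Z"]) j := by
      intro j hj
      have hm := (PySem.List.mem_pyRange_one).1 hj
      have hne : ¬ (i = j) := by omega
      simp [hne]
    rw [List.flatMap_congr hc, flatMap_const_Z, PySem.List.length_pyRange_one]
    simp
  have hpost : (PySem.List.pyRange (i + 1) m 1).flatMap
      (fun j => if i == j then block else ["Z"]) = List.replicate (m - 1 - i).toNat "Z" := by
    have hc : ∀ j ∈ PySem.List.pyRange (i + 1) m 1,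
        (if i == j then block else ["Z"]) = (fun _ : Int => ["Z"]) j := by
      intro j hj
      have hm := (PySem.List.mem_pyRange_one).1 hj
      have hne : ¬ (i = j) := by omega
      simp [hne]
    rw [List.flatMap_congr hc, flatMap_const_Z, PySem.List.length_pyRange_one]
    congr 1
    omega
  rw [hpre, hpost]
  simp

-- A's single-flip append loop (flip b at position j) equals the width-1 window block
lemma step_one (N : Int) (b : String) (bs : List (List String)) :
    (PySem.List.pyRange 0 N 1).foldl (fun bs j =>
        bs ++ [(PySem.List.pyRange 0 N 1).foldl
                 (fun t j2 => t ++ [if j == j2 then b else "Z"]) []]) bs =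
      bs ++ windowsRows [b] N := by
  rw [PySem.List.foldl_append_singleton_eq_map]
  unfold windowsRows
  simp only [List.length_cons, List.length_nil]
  push_cast
  have hr : N - 1 + 1 = N := by omega
  rw [hr]
  congr 1
  apply List.map_congr_left
  intro j hj
  have hji := (PySem.List.mem_pyRange_one).1 hj
  have hfun : (fun (t : List String) (j2 : Int) => t ++ [if j == j2 then b else "Z"])
      = (fun t j2 => t ++ (if j == j2 then [b] else ["Z"])) := by
    funext t j2
    by_cases h : j = j2 <;> simp [h]
  rw [hfun, row_concat_eq N j [b] (by omega) (by omega)]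

-- A's two-site append loop (b1 b2 at positions i, i+1) equals the width-2 window block
lemma step_two (N : Int) (b1 b2 : String) (bs : List (List String)) :
    (PySem.List.pyRange 0 (N - 1) 1).foldl (fun bs i =>
        bs ++ [(PySem.List.pyRange 0 (N - 1) 1).foldl
                 (fun t j => if i == j then t ++ [b1] ++ [b2] else t ++ ["Z"]) []]) bs =
      bs ++ windowsRows [b1, b2] N := by
  rw [PySem.List.foldl_append_singleton_eq_map]
  unfold windowsRows
  simp only [List.length_cons, List.length_nil]
  push_cast
  have hr : N - 2 + 1 = N - 1 := by omega
  rw [hr]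
  congr 1
  apply List.map_congr_left
  intro i hi
  have hii := (PySem.List.mem_pyRange_one).1 hi
  have hfun : (fun (t : List String) (j : Int) => if i == j then t ++ [b1] ++ [b2] else t ++ ["Z"])
      = (fun t j => t ++ (if i == j then [b1, b2] else ["Z"])) := by
    funext t j
    by_cases h : i = j <;> simp [h]
  rw [hfun, row_concat_eq (N - 1) i [b1, b2] (by omega) (by omega)]
  have h2 : N - 1 - 1 - i = N - 2 - i := by omega
  rw [h2]

-- A's 'xy2nn' two-site triple loop equals B's fold over the four ordered pairs
lemma step_xy2 (N : Int) (bs : List (List String)) :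
    (["X", "Y"]).foldl (fun bs b1 =>
        (["X", "Y"]).foldl (fun bs b2 =>
          (PySem.List.pyRange 0 (N - 1) 1).foldl (fun bs i =>
            bs ++ [(PySem.List.pyRange 0 (N - 1) 1).foldl
                     (fun t j => if i == j then t ++ [b1] ++ [b2] else t ++ ["Z"]) []]) bs) bs) bs =
      ([["X", "X"], ["X", "Y"], ["Y", "X"], ["Y", "Y"]]).foldl
        (fun bs p => bs ++ windowsRows p N) bs := by
  simp only [List.foldl_cons, List.foldl_nil, step_two]

-- ===== VERDICT (by name: the statement is the Claim_ definition above) =====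
theorem CreateBasisSet_spec : Claim_equal_CreateBasisSet := by
  intro name_code N _
  show CreateBasisSet name_code N = CreateBasisSet_alt name_code N
  unfold CreateBasisSet CreateBasisSet_alt
  simp only [zrow_eq, List.nil_append]
  by_cases h1 : name_code == "x" <;>
    by_cases h2 : (name_code == "xy1" || name_code == "xy2nn") <;>
      by_cases h3 : name_code == "xy2nn" <;>
        (simp only [h1, h3, Bool.or_true, Bool.or_false, if_true, if_false,
          Bool.false_eq_true, step_one, step_xy2]) <;>
        simp [List.foldl_cons, List.append_assoc]
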